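-- pv_equiv track=rewrite | github.com/PeddintiKusuma/GFG_problems | Difficulty: Easy/Last seen array element/last-seen-array-element.py | lastSeenElement
-- ===== SOURCE A (Python) =====
-- def lastSeenElement(arr):
--
--     # Complete the function
--     dic={}
--     ind=0
--     for ele in arr:
--         dic[ele]=ind
--         ind=ind+1
--
--     min_val=min(dic.values())
--     for k,v in dic.items():
--         if v==min_val:
--             return k
--     return -1
-- ===== SOURCE B (Python) =====
-- def lastSeenElement(arr):
--     rest = list(arr)
--     while rest:
--         x = rest.pop(0)
--         if x not in rest:
--             return x
-- ===== Notes on version B (the rewrite author's own statement) =====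
-- stated objective: simpler
-- what changed: Replaces A's last-index dictionary plus min-of-values plus key scan by a single front-to-back pass that returns the first element not occurring again later in the list.
import Mathlib
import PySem

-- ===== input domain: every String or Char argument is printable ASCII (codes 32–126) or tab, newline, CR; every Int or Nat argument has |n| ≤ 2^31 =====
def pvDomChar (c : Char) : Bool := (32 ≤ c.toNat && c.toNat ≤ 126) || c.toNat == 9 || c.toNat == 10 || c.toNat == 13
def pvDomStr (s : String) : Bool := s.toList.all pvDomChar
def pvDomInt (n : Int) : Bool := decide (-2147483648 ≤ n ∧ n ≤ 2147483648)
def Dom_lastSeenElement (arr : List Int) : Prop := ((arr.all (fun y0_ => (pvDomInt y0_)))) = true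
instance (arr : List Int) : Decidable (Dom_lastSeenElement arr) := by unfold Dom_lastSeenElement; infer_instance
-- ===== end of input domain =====

-- B replaces A's last-index dictionary + min + key scan by one front-to-back pass
-- returning the first element that does not occur again later (simpler, not faster).

-- ===== PORT A =====
-- A's 'for ele in arr: dic[ele]=ind; ind=ind+1' loop, as structural recursion over the same (dic, ind) state
def buildDic : List Int → Int → PySem.Dict Int Int → PySem.Dict Int Int
  | [], _, d => d
  | e :: t, i, d => buildDic t (i + 1) (d.insert e i)

-- A's second loop 'for k,v in dic.items(): if v==min_val: return k' followed by 'return -1'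
def scanA : List (Int × Int) → Int → Int
  | [], _ => -1
  | (k, v) :: t, mv => if v = mv then k else scanA t mv

def lastSeenElement (arr : List Int) : Int :=
  let dic := buildDic arr 0 PySem.Dict.empty
  match PySem.List.min? dic.values (fun v => v) with
  | none => -1          -- Python's min raises ValueError here (arr = []); excluded by Pre_
  | some mv => scanA dic.items mv

-- ===== PORT B =====
-- B's 'while rest: x = rest.pop(0); if x not in rest: return x' loop
def altGo : List Int → Int
  | [] => -1            -- loop exhausted: Python B returns None; only reachable for arr = [], excluded by Pre_
  | x :: rest => if rest.contains x then altGo rest else x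

def lastSeenElement_alt (arr : List Int) : Int := altGo arr

-- ===== PRECONDITION & SPEC =====
-- A raises ValueError (min of an empty dict's values) exactly on the empty list
def Pre_lastSeenElement (arr : List Int) : Prop := arr ≠ []
instance (arr : List Int) : Decidable (Pre_lastSeenElement arr) := by unfold Pre_lastSeenElement; infer_instance
def pvWitness_lastSeenElement : List Int := [3, 1, 3, 2]

def Spec_lastSeenElement (arr : List Int) (out : Int) : Prop := out = lastSeenElement_alt arr
instance (arr : List Int) (out : Int) : Decidable (Spec_lastSeenElement arr out) := by unfold Spec_lastSeenElement; infer_instance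

-- ===== CLAIM (what is proved, stated in full; the proofs are below) =====
def Claim_equal_lastSeenElement : Prop := ∀ (arr : List Int), Dom_lastSeenElement arr → Pre_lastSeenElement arr → Spec_lastSeenElement arr (lastSeenElement arr)

-- ===== LEMMAS AND PROOFS =====

-- last-occurrence index of k in l (proof-side characterisation of A's dict values)
def lastIdx? : List Int → Int → Option Int
  | [], _ => none
  | x :: t, k =>
    match lastIdx? t k with
    | some j => some (j + 1)
    | none => if k = x then some 0 else none

theorem lastIdx?_eq_none_iff (l : List Int) (k : Int) : lastIdx? l k = none ↔ k ∉ l := by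
  induction l with
  | nil => simp [lastIdx?]
  | cons x t ih =>
    simp only [lastIdx?]
    cases h : lastIdx? t k with
    | some j =>
      have hkt : k ∈ t := by by_contra hk; simp [ih.mpr hk] at h
      simp [hkt]
    | none =>
      have hk : k ∉ t := ih.mp h
      by_cases hx : k = x <;> simp [hx, hk]

theorem lastIdx?_nonneg (l : List Int) (k : Int) {j : Int} (h : lastIdx? l k = some j) : 0 ≤ j := by
  induction l generalizing j with
  | nil => simp [lastIdx?] at h
  | cons x t ih =>
    simp only [lastIdx?] at h
    cases h' : lastIdx? t k with
    | some j' =>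
      rw [h'] at h; simp at h
      have := ih h'; omega
    | none =>
      rw [h'] at h
      by_cases hx : k = x <;> simp [hx] at h
      omega

theorem lastIdx?_inj (l : List Int) (k₁ k₂ : Int) {j : Int}
    (h₁ : lastIdx? l k₁ = some j) (h₂ : lastIdx? l k₂ = some j) : k₁ = k₂ := by
  induction l generalizing j with
  | nil => simp [lastIdx?] at h₁
  | cons x t ih =>
    simp only [lastIdx?] at h₁ h₂
    cases e₁ : lastIdx? t k₁ with
    | some j₁ =>
      rw [e₁] at h₁; simp at h₁
      cases e₂ : lastIdx? t k₂ with
      | some j₂ =>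
        rw [e₂] at h₂; simp at h₂
        have hj : j₁ = j₂ := by omega
        exact ih e₁ (hj ▸ e₂)
      | none =>
        rw [e₂] at h₂
        by_cases hx : k₂ = x <;> simp [hx] at h₂
        have := lastIdx?_nonneg t k₁ e₁
        omega
    | none =>
      rw [e₁] at h₁
      by_cases hx : k₁ = x
      · simp [hx] at h₁
        cases e₂ : lastIdx? t k₂ with
        | some j₂ =>
          rw [e₂] at h₂; simp at h₂
          have := lastIdx?_nonneg t k₂ e₂
          omega
        | none =>
          rw [e₂] at h₂
          by_cases hx2 : k₂ = x <;> simp [hx2] at h₂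
          omega
      · simp [hx] at h₁

-- the dict loop computes, for every key, its last-occurrence index (offset by the start index)
theorem buildDic_get? (l : List Int) (i : Int) (d : PySem.Dict Int Int) (k : Int) :
    (buildDic l i d).get? k =
      match lastIdx? l k with
      | some j => some (i + j)
      | none => d.get? k := by
  induction l generalizing i d with
  | nil => simp [buildDic, lastIdx?]
  | cons x t ih =>
    simp only [buildDic, lastIdx?]
    rw [ih]
    cases h : lastIdx? t k with
    | some j => simp; ring_nf
    | none =>
      simp only
      rw [PySem.Dict.get?_insert]
      by_cases hx : k = x <;> simp [hx]

theorem buildDic_eq_foldl (l : List Int) (i : Int) (d : PySem.Dict Int Int) :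
    buildDic l i d = (PySem.List.enumerate l i).foldl (fun d p => d.insert p.2 p.1) d := by
  induction l generalizing i d with
  | nil => simp [buildDic, PySem.List.enumerate_nil]
  | cons x t ih => simp [buildDic, PySem.List.enumerate_cons, ih]

theorem buildDic_nodup_keys (l : List Int) (i : Int) :
    (buildDic l i PySem.Dict.empty).keys.Nodup := by
  rw [buildDic_eq_foldl]
  exact PySem.Dict.nodup_keys_foldl_insert_key (PySem.List.enumerate l i)
    (fun (p : Int × Int) => p.2) (fun d p => p.1) PySem.Dict.empty PySem.Dict.nodup_keys_empty

theorem mem_items_of_get? (d : PySem.Dict Int Int) (k v : Int)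
    (h : d.get? k = some v) : (k, v) ∈ d.items := by
  simp only [PySem.Dict.get?, Option.map_eq_some_iff] at h
  obtain ⟨p, hp, hv⟩ := h
  have hk : p.1 = k := by simpa using List.find?_some hp
  have hm := List.mem_of_find?_eq_some hp
  have hpe : p = (k, v) := by obtain ⟨a, b⟩ := p; simp_all
  rwa [← hpe]

-- scanA returns k₀ when (k₀, mv) is in the items and no other pair carries value mv
theorem scanA_eq (items : List (Int × Int)) (mv k₀ : Int)
    (huniq : ∀ p ∈ items, p.2 = mv → p.1 = k₀)
    (hmem : (k₀, mv) ∈ items) : scanA items mv = k₀ := by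
  induction items with
  | nil => simp at hmem
  | cons p t ih =>
    obtain ⟨k, v⟩ := p
    simp only [scanA]
    by_cases hv : v = mv
    · simpa [hv] using huniq (k, v) (by simp) hv
    · rw [if_neg hv]
      apply ih (fun q hq hq2 => huniq q (List.mem_cons_of_mem _ hq) hq2)
      rcases List.mem_cons.mp hmem with h | h
      · injection h with h1 h2; exact absurd h2.symm hv
      · exact h

-- A's dict at start index 0: lookup is exactly the last-occurrence index
theorem final_get? (arr : List Int) (k : Int) :
    (buildDic arr 0 PySem.Dict.empty).get? k = lastIdx? arr k := by
  rw [buildDic_get?]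
  cases h : lastIdx? arr k with
  | some j => simp
  | none => simp [PySem.Dict.get?_empty]

-- A returns any key of minimal last-occurrence index
theorem A_char (arr : List Int) (k₀ m : Int)
    (hk : lastIdx? arr k₀ = some m)
    (hmin : ∀ k j, lastIdx? arr k = some j → m ≤ j) :
    lastSeenElement arr = k₀ := by
  simp only [lastSeenElement]
  set d := buildDic arr 0 PySem.Dict.empty with hd
  have hnodup : d.keys.Nodup := buildDic_nodup_keys arr 0
  have hmemk : (k₀, m) ∈ d.items := mem_items_of_get? d k₀ m (by rw [hd, final_get?, hk])
  have hmv : m ∈ d.values := by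
    simp only [PySem.Dict.values]
    exact List.mem_map.mpr ⟨(k₀, m), hmemk, rfl⟩
  cases hmin? : PySem.List.min? d.values (fun v => v) with
  | none => rw [PySem.List.min?_eq_none_iff] at hmin?; simp [hmin?] at hmv
  | some mv =>
    have hmvmem : mv ∈ d.values := PySem.List.min?_mem hmin?
    -- every value of d is a last-occurrence index, hence ≥ m
    have hval : ∀ v ∈ d.values, ∃ k, lastIdx? arr k = some v := by
      intro v hv
      simp only [PySem.Dict.values] at hv
      obtain ⟨⟨a, b⟩, hp, hp2⟩ := List.mem_map.mp hv
      simp at hp2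
      subst hp2
      have := PySem.Dict.get?_of_mem_items d hp hnodup
      exact ⟨a, by rw [← final_get?, ← hd]; exact this⟩
    have hmmv : m = mv := by
      obtain ⟨k₁, hk₁⟩ := hval mv hmvmem
      have h1 : m ≤ mv := hmin k₁ mv hk₁
      have h2 : mv ≤ m := PySem.List.min?_isMin hmin? m hmv
      omega
    subst hmmv
    exact scanA_eq d.items m k₀
      (fun p hp hp2 => by
        obtain ⟨a, b⟩ := p
        simp only at hp2
        subst hp2
        have hg := PySem.Dict.get?_of_mem_items d hp hnodup
        rw [hd, final_get?] at hg
        exact lastIdx?_inj arr a k₀ hg hk)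
      hmemk

-- B returns an element of minimal last-occurrence index
theorem B_char (arr : List Int) (hne : arr ≠ []) :
    ∃ m, lastIdx? arr (altGo arr) = some m ∧ ∀ k j, lastIdx? arr k = some j → m ≤ j := by
  induction arr with
  | nil => exact absurd rfl hne
  | cons x t ih =>
    by_cases hx : x ∈ t
    · have ht : t ≠ [] := by rintro rfl; simp at hx
      obtain ⟨m, hm, hmin⟩ := ih ht
      refine ⟨m + 1, ?_, ?_⟩
      · simp only [altGo]
        rw [if_pos (show t.contains x = true by simpa using hx)]
        simp only [lastIdx?, hm]
      · intro k j hj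
        simp only [lastIdx?] at hj
        cases e : lastIdx? t k with
        | some j' =>
          rw [e] at hj; simp at hj
          have := hmin k j' e
          omega
        | none =>
          rw [e] at hj
          by_cases hkx : k = x
          · subst hkx
            exact absurd ((lastIdx?_eq_none_iff t k).mp e) (by simpa using hx)
          · simp [hkx] at hj
    · have hnone : lastIdx? t x = none := (lastIdx?_eq_none_iff t x).mpr hx
      refine ⟨0, ?_, ?_⟩
      · simp only [altGo]
        rw [if_neg (show ¬ t.contains x = true by simpa using hx)]
        simp [lastIdx?, hnone]
      · intro k j hj
        exact lastIdx?_nonneg _ k hj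

-- ===== VERDICT (by name: the statement is the Claim_ definition above) =====
theorem lastSeenElement_spec : Claim_equal_lastSeenElement := by
  intro arr _ hpre
  unfold Spec_lastSeenElement
  obtain ⟨m, hm, hmin⟩ := B_char arr hpre
  exact A_char arr _ m hm hmin
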